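-- pv_equiv track=rewrite | github.com/ChicoState/cheat-sheet | backend/api/services/practice_problem_compiler.py | _find_first_mixed_indent_line
-- ===== SOURCE A (Python) =====
-- def _find_first_mixed_indent_line(lines: list[str]) -> int:
--     saw_tabs = False
--     saw_spaces = False
--
--     for line_number, line in enumerate(lines, start=1):
--         indent = _leading_whitespace(line)
--         if not indent:
--             continue
--
--         if "\t" in indent:
--             saw_tabs = True
--         if " " in indent:
--             saw_spaces = True
--
--         if saw_tabs and saw_spaces:
--             return line_number
--
--     return 1
--
-- def _leading_whitespace(value: str) -> str:
--     return value[: len(value) - len(value.lstrip(" \t"))]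
-- ===== SOURCE B (Python) =====
-- def _leading_whitespace(value: str) -> str:
--     return value[: len(value) - len(value.lstrip(" \t"))]
--
--
-- def _first_line_with(lines: list[str], ch: str):
--     for line_number, line in enumerate(lines, start=1):
--         if ch in _leading_whitespace(line):
--             return line_number
--     return None
--
--
-- def _find_first_mixed_indent_line(lines: list[str]) -> int:
--     first_tab = _first_line_with(lines, "\t")
--     first_space = _first_line_with(lines, " ")
--     if first_tab is None or first_space is None:
--         return 1
--     return max(first_tab, first_space)
-- ===== Notes on version B (the rewrite author's own statement) =====
-- stated objective: alternative
-- what changed: Replaces the single scan that threads two monotone saw_tabs/saw_spaces flags with two independent first-occurrence searches (first line whose indent has a tab, first whose indent has a space) combined by max, returning 1 if either is absent.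
import Mathlib
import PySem

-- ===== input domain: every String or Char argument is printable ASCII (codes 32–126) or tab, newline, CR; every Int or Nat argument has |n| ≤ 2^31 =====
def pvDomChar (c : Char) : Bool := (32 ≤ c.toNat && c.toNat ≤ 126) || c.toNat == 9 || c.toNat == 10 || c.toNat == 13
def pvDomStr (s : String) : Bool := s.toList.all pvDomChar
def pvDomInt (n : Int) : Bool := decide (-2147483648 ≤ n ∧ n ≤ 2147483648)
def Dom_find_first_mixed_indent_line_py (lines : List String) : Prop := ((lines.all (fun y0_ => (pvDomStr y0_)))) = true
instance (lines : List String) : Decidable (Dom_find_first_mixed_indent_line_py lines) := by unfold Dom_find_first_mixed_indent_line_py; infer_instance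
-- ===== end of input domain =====

-- B replaces A's single scan threading two monotone flags by two independent
-- first-occurrence searches combined with max (objective: alternative decomposition).

-- ===== PORT A =====
-- _leading_whitespace: value[: len(value) - len(value.lstrip(" \t"))]
-- value.lstrip(" \t") is ported by hand as dropWhile over the two chars (exact:
-- lstrip with an explicit char set removes exactly the maximal leading run of those chars).
def pvLW (s : List Char) : List Char :=
  let stripped := s.dropWhile (fun c => c == ' ' || c == '\t')
  PySem.List.slice s none (some ((s.length : Int) - (stripped.length : Int)))

-- A's loop: enumerate from 1, skip empty indents, set flags, return on both set.
def ffmLoopA : List (List Char) → Int → Bool → Bool → Int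
  | [], _, _, _ => 1
  | l :: rest, n, saw_tabs, saw_spaces =>
    let indent := pvLW l
    if indent.isEmpty then ffmLoopA rest (n + 1) saw_tabs saw_spaces
    else
      let saw_tabs := saw_tabs || PySem.Chars.isIn ['\t'] indent
      let saw_spaces := saw_spaces || PySem.Chars.isIn [' '] indent
      if saw_tabs && saw_spaces then n else ffmLoopA rest (n + 1) saw_tabs saw_spaces

def find_first_mixed_indent_line_py (lines : List String) : Int :=
  ffmLoopA (lines.map String.toList) 1 false false

-- ===== PORT B =====
-- first (1-based) line index whose leading whitespace contains ch, else none
def ffmFirst (c : Char) : List (List Char) → Int → Option Int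
  | [], _ => none
  | l :: rest, n =>
    if PySem.Chars.isIn [c] (pvLW l) then some n else ffmFirst c rest (n + 1)

def find_first_mixed_indent_line_py_alt (lines : List String) : Int :=
  let ls := lines.map String.toList
  match ffmFirst '\t' ls 1, ffmFirst ' ' ls 1 with
  | some t, some s => max t s
  | _, _ => 1

-- ===== PRECONDITION & SPEC =====
def Spec_find_first_mixed_indent_line_py (lines : List String) (out : Int) : Prop := out = find_first_mixed_indent_line_py_alt lines
instance (lines : List String) (out : Int) : Decidable (Spec_find_first_mixed_indent_line_py lines out) := by unfold Spec_find_first_mixed_indent_line_py; infer_instance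

-- ===== CLAIM (what is proved, stated in full; the proofs are below) =====
def Claim_equal_find_first_mixed_indent_line_py : Prop := ∀ (lines : List String), Dom_find_first_mixed_indent_line_py lines → Spec_find_first_mixed_indent_line_py lines (find_first_mixed_indent_line_py lines)

-- ===== LEMMAS AND PROOFS =====

theorem isIn_empty (c : Char) : PySem.Chars.isIn [c] ([] : List Char) = false := by
  rw [PySem.Chars.isIn_eq_false_iff]
  simp

theorem ffmFirst_ge (c : Char) (ls : List (List Char)) (n b : Int)
    (h : ffmFirst c ls n = some b) : n ≤ b := by
  induction ls generalizing n with
  | nil => simp [ffmFirst] at h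
  | cons l rest ih =>
    simp only [ffmFirst] at h
    split at h
    · simp at h; omega
    · have := ih (n + 1) h; omega

theorem loopA_true_false (ls : List (List Char)) (n : Int) :
    ffmLoopA ls n true false = (ffmFirst ' ' ls n).getD 1 := by
  induction ls generalizing n with
  | nil => simp [ffmLoopA, ffmFirst]
  | cons l rest ih =>
    simp only [ffmLoopA, ffmFirst]
    by_cases he : (pvLW l).isEmpty
    · have : pvLW l = [] := by simpa [List.isEmpty_iff] using he
      simp [this, isIn_empty, ih]
    · by_cases hs : PySem.Chars.isIn [' '] (pvLW l)
      · simp [he, hs]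
      · simp [he, hs, ih]

theorem loopA_false_true (ls : List (List Char)) (n : Int) :
    ffmLoopA ls n false true = (ffmFirst '\t' ls n).getD 1 := by
  induction ls generalizing n with
  | nil => simp [ffmLoopA, ffmFirst]
  | cons l rest ih =>
    simp only [ffmLoopA, ffmFirst]
    by_cases he : (pvLW l).isEmpty
    · have : pvLW l = [] := by simpa [List.isEmpty_iff] using he
      simp [this, isIn_empty, ih]
    · by_cases ht : PySem.Chars.isIn ['\t'] (pvLW l)
      · simp [he, ht]
      · simp [he, ht, ih]

theorem loopA_false_false (ls : List (List Char)) (n : Int) :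
    ffmLoopA ls n false false =
      (match ffmFirst '\t' ls n, ffmFirst ' ' ls n with
       | some t, some s => max t s
       | _, _ => 1) := by
  induction ls generalizing n with
  | nil => simp [ffmLoopA, ffmFirst]
  | cons l rest ih =>
    simp only [ffmLoopA, ffmFirst]
    by_cases he : (pvLW l).isEmpty
    · have hnil : pvLW l = [] := by simpa [List.isEmpty_iff] using he
      simp [hnil, isIn_empty, ih]
    · by_cases ht : PySem.Chars.isIn ['\t'] (pvLW l)
      · by_cases hs : PySem.Chars.isIn [' '] (pvLW l)
        · simp [he, ht, hs]
        · -- tab first: loop continues with saw_tabs = true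
          simp only [he, ht, hs, Bool.false_or, Bool.and_false,
            Bool.false_eq_true, if_false]
          rw [loopA_true_false]
          cases hfs : ffmFirst ' ' rest (n + 1) with
          | none => simp
          | some b =>
            have := ffmFirst_ge ' ' rest (n + 1) b hfs
            simp [Option.getD]
            omega
      · by_cases hs : PySem.Chars.isIn [' '] (pvLW l)
        · -- space first: loop continues with saw_spaces = true
          simp only [he, ht, hs, Bool.false_or, Bool.false_and,
            Bool.false_eq_true, if_false]
          rw [loopA_false_true]
          cases hft : ffmFirst '\t' rest (n + 1) with
          | none => simp
          | some b =>
            have := ffmFirst_ge '\t' rest (n + 1) b hft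
            simp [Option.getD]
            omega
        · simp [he, ht, hs, ih]

-- ===== VERDICT (by name: the statement is the Claim_ definition above) =====
theorem find_first_mixed_indent_line_py_spec : Claim_equal_find_first_mixed_indent_line_py := by
  intro lines _
  unfold Spec_find_first_mixed_indent_line_py
  unfold find_first_mixed_indent_line_py find_first_mixed_indent_line_py_alt
  exact loopA_false_false (lines.map String.toList) 1
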